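-- pv_equiv track=rewrite | github.com/vterreno/ejercicios-curso-python | Ejercicios/Ejercicio #16 - Volumen 4 - 400 - Durmiendo en albergues/AbrilCarballo.py | leer_izq
-- ===== SOURCE A (Python) =====
-- def leer_izq(camas): # .....x
--     total_izq = -1
--     for i in range(len(camas)):
--         if camas[i] == ".":
--             total_izq += 1
--         if camas[i] == "x":
--             return total_izq
--     return total_izq
-- ===== SOURCE B (Python) =====
-- def leer_izq(camas):
--     idx = camas.index("x") if "x" in camas else len(camas)
--     return camas[:idx].count(".") - 1
-- ===== Notes on version B (the rewrite author's own statement) =====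
-- stated objective: simpler
-- what changed: Replaces the accumulating character loop with early return by a find-the-boundary step (str.index guarded by membership, len fallback) followed by a separate str.count over the prefix slice, then subtracting 1.
import Mathlib
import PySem

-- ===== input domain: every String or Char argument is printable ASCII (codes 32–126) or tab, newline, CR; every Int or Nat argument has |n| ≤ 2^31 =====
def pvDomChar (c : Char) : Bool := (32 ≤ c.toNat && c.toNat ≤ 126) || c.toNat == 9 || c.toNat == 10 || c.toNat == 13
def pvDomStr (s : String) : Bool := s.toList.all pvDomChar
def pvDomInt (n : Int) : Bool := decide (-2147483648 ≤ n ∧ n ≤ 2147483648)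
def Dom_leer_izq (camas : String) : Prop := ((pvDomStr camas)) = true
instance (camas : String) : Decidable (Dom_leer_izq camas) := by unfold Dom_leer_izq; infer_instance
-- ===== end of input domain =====

-- B replaces A's single accumulating loop (early return at the first 'x') by locating the
-- boundary with index/membership and counting dots in the prefix slice: simpler decomposition, measured faster (C-level built-ins).


-- ===== PORT A =====
-- the for-loop over range(len(camas)) with early return, as structural recursion over the chars
def leerIzqGo : List Char → Int → Int
  | [], acc => acc
  | c :: cs, acc =>
    let acc' := if c = '.' then acc + 1 else acc
    if c = 'x' then acc' else leerIzqGo cs acc'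

def leer_izq (camas : String) : Int := leerIzqGo camas.toList (-1)

-- ===== PORT B =====
def leer_izq_alt (camas : String) : Int :=
  let cs := camas.toList
  let idx : Int :=
    if PySem.Chars.isIn ['x'] cs then PySem.Chars.find cs ['x'] else (cs.length : Int)
  (PySem.Chars.count (PySem.List.slice cs none (some idx)) ['.'] : Int) - 1

-- ===== PRECONDITION & SPEC =====
def Spec_leer_izq (camas : String) (out : Int) : Prop := out = leer_izq_alt camas
instance (camas : String) (out : Int) : Decidable (Spec_leer_izq camas out) := by unfold Spec_leer_izq; infer_instance

-- ===== CLAIM (what is proved, stated in full; the proofs are below) =====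
def Claim_equal_leer_izq : Prop := ∀ (camas : String), Dom_leer_izq camas → Spec_leer_izq camas (leer_izq camas)

-- ===== LEMMAS AND PROOFS =====

-- A's loop counts '.' in the prefix before the first 'x'
theorem leerIzqGo_eq (cs : List Char) : ∀ (acc : Int),
    leerIzqGo cs acc = acc + (List.count '.' (cs.takeWhile (fun c => !(c == 'x'))) : Int) := by
  induction cs with
  | nil => intro acc; simp [leerIzqGo]
  | cons c t ih =>
    intro acc
    by_cases hx : c = 'x'
    · subst hx
      simp [leerIzqGo]
    · by_cases hd : c = '.'
      · subst hd
        simp [leerIzqGo, ih]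
        omega
      · simp [leerIzqGo, hx, hd, ih]

-- single-character Chars.count is List.count
theorem countGo_single (c : Char) : ∀ (fuel : Nat) (s : List Char) (acc : Nat),
    s.length ≤ fuel → PySem.Chars.count.go [c] fuel s acc = acc + List.count c s := by
  intro fuel
  induction fuel with
  | zero =>
    intro s acc h
    have : s = [] := List.eq_nil_of_length_eq_zero (Nat.le_zero.mp h)
    subst this; simp [PySem.Chars.count.go]
  | succ n ih =>
    intro s acc h
    cases s with
    | nil => simp [PySem.Chars.count.go]
    | cons a t =>
      simp only [PySem.Chars.count.go]
      by_cases hc : c = a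
      · subst hc
        simp only [List.isPrefixOf, BEq.rfl, Bool.true_and, if_pos]
        simp only [List.length, List.drop_succ_cons, List.drop_zero]
        rw [ih t (acc + 1) (by simpa using Nat.le_of_succ_le_succ h)]
        simp
        omega
      · have : ([c].isPrefixOf (a :: t)) = false := by
          simp [List.isPrefixOf, hc]
        rw [if_neg (by rw [this]; simp)]
        rw [ih t acc (by simpa using Nat.le_of_succ_le_succ h)]
        simp [show ¬ a = c from fun h => hc h.symm]

theorem count_single (c : Char) (s : List Char) :
    PySem.Chars.count s [c] = List.count c s := by
  simp only [PySem.Chars.count, List.isEmpty]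
  · exact (countGo_single c s.length s 0 (le_refl _)).trans (by omega)

-- find on a single-character needle is the first index of that char, -1 if absent
theorem findGo_single (x : Char) : ∀ (cs : List Char) (k : Nat),
    PySem.Chars.find.go [x] cs k = if x ∈ cs then ((k + cs.idxOf x : Nat) : Int) else -1 := by
  intro cs
  induction cs with
  | nil => intro k; simp [PySem.Chars.find.go]
  | cons a t ih =>
    intro k
    by_cases hx : x = a
    · subst hx
      simp [PySem.Chars.find.go, List.isPrefixOf, List.idxOf_cons_self]
    · have hpre : ([x].isPrefixOf (a :: t)) = false := by
        simp [List.isPrefixOf, hx]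
      simp only [PySem.Chars.find.go, hpre, Bool.false_eq_true, if_false]
      rw [ih (k + 1)]
      have hmem : (x ∈ a :: t) ↔ (x ∈ t) := by simp [hx]
      by_cases hm : x ∈ t
      · rw [if_pos hm, if_pos (hmem.mpr hm)]
        rw [List.idxOf_cons_ne _ (by simpa using fun h => hx h.symm)]
        push_cast
        omega
      · rw [if_neg hm, if_neg (fun h => hm (hmem.mp h))]

-- the prefix before the first x is the takeWhile prefix
theorem take_idxOf_eq_takeWhile (x : Char) (cs : List Char) :
    cs.take (cs.idxOf x) = cs.takeWhile (fun c => !(c == x)) := by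
  induction cs with
  | nil => simp
  | cons a t ih =>
    by_cases hx : a = x
    · subst hx; simp [List.idxOf_cons_self]
    · rw [List.idxOf_cons_ne _ (by simpa using hx), List.take_succ_cons,
        List.takeWhile_cons, if_pos (by simp [hx]), ih]

theorem not_mem_takeWhile_eq_self (x : Char) (cs : List Char) (h : x ∉ cs) :
    cs.takeWhile (fun c => !(c == x)) = cs := by
  apply List.takeWhile_eq_self_iff.mpr
  intro c hc
  simp only [Bool.not_eq_eq_eq_not, Bool.not_true, beq_eq_false_iff_ne]
  exact fun hcx => h (hcx ▸ hc)

-- ===== VERDICT (by name: the statement is the Claim_ definition above) =====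
theorem leer_izq_spec : Claim_equal_leer_izq := by
  intro camas _
  unfold Spec_leer_izq leer_izq leer_izq_alt
  set cs := camas.toList with hcs
  have hfind : PySem.Chars.find cs ['x'] =
      if 'x' ∈ cs then ((cs.idxOf 'x' : Nat) : Int) else -1 := by
    rw [PySem.Chars.find, findGo_single]
    simp
  have hisin : PySem.Chars.isIn ['x'] cs = decide ('x' ∈ cs) := by
    rw [PySem.Chars.isIn, hfind]
    by_cases hm : 'x' ∈ cs <;> simp [hm]
  rw [leerIzqGo_eq]
  by_cases hm : 'x' ∈ cs
  · have h0 : (0 : Int) ≤ ((cs.idxOf 'x' : Nat) : Int) := by positivity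
    simp only [hisin, hm, decide_true, if_true, hfind, PySem.List.slice_to _ h0,
      count_single, Int.toNat_natCast, take_idxOf_eq_takeWhile]
    omega
  · have h0 : (0 : Int) ≤ ((cs.length : Nat) : Int) := by positivity
    simp only [hisin, hm, decide_false, Bool.false_eq_true, if_false,
      PySem.List.slice_to _ h0, count_single, Int.toNat_natCast, List.take_length,
      not_mem_takeWhile_eq_self _ _ hm]
    omega
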